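-- pv_equiv track=rewrite | github.com/CS433-DCML-2022/ComposersClassifier | data/ray_NER.py | disqualifyingWords
-- ===== SOURCE A (Python) =====
-- def disqualifyingWords(wordList):
--     for index,word in enumerate(wordList):
--         word=str.lower(word)
--         word = ''.join(e for e in word if e.isalnum())
--         if len(word) > 2:
--             #keep larry, barry and harry
--             if 'arr' in word[:3] and index == 0: return True
--             if 'transcription' in word and index == 0: return True
--             if 'transcripción' in word and index == 0: return True
--             if 'trans'in word and index == 0: return True
--             if 'trad'in word and index == 0: return True
--             if 'unbekannt' in word: return True
--             if 'reelkey' in word: return True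
--             if 'santa' in word and index ==0: return True
--             if 'hornpipekey' in word: return True
--             if 'strathspeykey' in word: return True
--             if 'polkakey' in word: return True
--     return False
-- ===== SOURCE B (Python) =====
-- # Inverted loop nesting: one staged pass normalizes every word, then the outer
-- # loop runs over the keyword battery, scanning the normalized words per keyword;
-- # the first-word-only keywords are checked once against norms[0]. No index, no
-- # per-word keyword chain.
-- _FIRST_KEYS = ['transcription', 'transcripci\u00f3n', 'trans', 'trad', 'santa']
-- _GLOBAL_KEYS = ['unbekannt', 'reelkey', 'hornpipekey', 'strathspeykey', 'polkakey']
--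
-- def _norm(w):
--     return ''.join(c for c in w.lower() if c.isalnum())
--
-- def disqualifyingWords(wordList):
--     norms = [_norm(w) for w in wordList]
--     if norms and len(norms[0]) > 2 and (
--             'arr' in norms[0][:3] or any(k in norms[0] for k in _FIRST_KEYS)):
--         return True
--     for k in _GLOBAL_KEYS:
--         if any(len(n) > 2 and k in n for n in norms):
--             return True
--     return False
-- ===== Notes on version B (the rewrite author's own statement) =====
-- stated objective: alternative
-- what changed: Inverts the loop nesting: B first normalizes every word in a staged pass, then its outer loop runs over the global keyword battery (scanning all normalized words per keyword), with the first-word-only keywords tested once against norms[0]; A instead makes one indexed pass over the words with an unrolled per-word keyword if-chain.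
import Mathlib
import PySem

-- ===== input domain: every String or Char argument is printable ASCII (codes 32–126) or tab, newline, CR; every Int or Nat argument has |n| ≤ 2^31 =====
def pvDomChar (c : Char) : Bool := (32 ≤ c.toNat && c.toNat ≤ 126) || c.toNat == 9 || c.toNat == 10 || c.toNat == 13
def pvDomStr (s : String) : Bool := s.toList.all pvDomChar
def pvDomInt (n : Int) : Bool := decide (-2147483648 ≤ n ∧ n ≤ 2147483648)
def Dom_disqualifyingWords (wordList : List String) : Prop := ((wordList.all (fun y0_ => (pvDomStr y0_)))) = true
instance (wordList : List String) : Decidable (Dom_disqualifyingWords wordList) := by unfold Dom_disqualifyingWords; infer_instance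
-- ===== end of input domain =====

-- B inverts A's loop nesting: it normalizes every word in a staged pass, then loops over the
-- keyword battery (scanning the normalized words per keyword); same cost, different traversal.

-- ===== PORT A =====
def pvNormA (word : String) : List Char :=
  (PySem.Chars.lower word.toList).filter (fun e => PySem.Chars.isalnum e)

def pvLoopA : List (Int × String) → Bool
  | [] => false
  | (index, word) :: rest =>
    let w := pvNormA word
    if w.length > 2 then
      if PySem.Chars.isIn "arr".toList (PySem.List.slice w none (some 3)) && (index == 0) then true
      else if PySem.Chars.isIn "transcription".toList w && (index == 0) then true
      else if PySem.Chars.isIn "transcripción".toList w && (index == 0) then true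
      else if PySem.Chars.isIn "trans".toList w && (index == 0) then true
      else if PySem.Chars.isIn "trad".toList w && (index == 0) then true
      else if PySem.Chars.isIn "unbekannt".toList w then true
      else if PySem.Chars.isIn "reelkey".toList w then true
      else if PySem.Chars.isIn "santa".toList w && (index == 0) then true
      else if PySem.Chars.isIn "hornpipekey".toList w then true
      else if PySem.Chars.isIn "strathspeykey".toList w then true
      else if PySem.Chars.isIn "polkakey".toList w then true
      else pvLoopA rest
    else pvLoopA rest

def disqualifyingWords (wordList : List String) : Bool :=
  pvLoopA (PySem.List.enumerate wordList 0)

-- ===== PORT B =====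
def pvFirstKeys : List (List Char) :=
  ["transcription".toList, "transcripción".toList, "trans".toList, "trad".toList, "santa".toList]

def pvGlobalKeys : List (List Char) :=
  ["unbekannt".toList, "reelkey".toList, "hornpipekey".toList, "strathspeykey".toList, "polkakey".toList]

def pvNormB (w : String) : List Char :=
  (PySem.Chars.lower w.toList).filter (fun c => PySem.Chars.isalnum c)

def disqualifyingWords_alt (wordList : List String) : Bool :=
  let norms := wordList.map pvNormB
  (match norms with
   | [] => false
   | n0 :: _ =>
     decide (n0.length > 2) &&
       (PySem.Chars.isIn "arr".toList (n0.take 3) ||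
         pvFirstKeys.any (fun k => PySem.Chars.isIn k n0)))
  || pvGlobalKeys.any (fun k =>
       norms.any (fun n => decide (n.length > 2) && PySem.Chars.isIn k n))

-- ===== PRECONDITION & SPEC =====
def Spec_disqualifyingWords (wordList : List String) (out : Bool) : Prop := out = disqualifyingWords_alt wordList
instance (wordList : List String) (out : Bool) : Decidable (Spec_disqualifyingWords wordList out) := by unfold Spec_disqualifyingWords; infer_instance

-- ===== CLAIM (what is proved, stated in full; the proofs are below) =====
def Claim_equal_disqualifyingWords : Prop := ∀ (wordList : List String), Dom_disqualifyingWords wordList → Spec_disqualifyingWords wordList (disqualifyingWords wordList)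

-- ===== LEMMAS AND PROOFS =====

-- word-major hit against the global battery, used as the common middle form
def pvGlobalHit (n : List Char) : Bool :=
  decide (n.length > 2) && pvGlobalKeys.any (fun k => PySem.Chars.isIn k n)

-- swapping the two nested `any`s
theorem pvAnySwap {α β : Type} (l : List α) (m : List β) (p : α → β → Bool) :
    m.any (fun b => l.any (fun a => p a b)) = l.any (fun a => m.any (fun b => p a b)) := by
  apply Bool.eq_iff_iff.mpr
  simp only [List.any_eq_true]
  constructor
  · rintro ⟨b, hb, a, ha, h⟩; exact ⟨a, ha, b, hb, h⟩
  · rintro ⟨a, ha, b, hb, h⟩; exact ⟨b, hb, a, ha, h⟩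

theorem pvGlobalSwap (norms : List (List Char)) :
    (pvGlobalKeys.any (fun k =>
        norms.any (fun n => decide (n.length > 2) && PySem.Chars.isIn k n)))
      = norms.any pvGlobalHit := by
  have h : ∀ n : List Char,
      (pvGlobalKeys.any (fun k => decide (n.length > 2) && PySem.Chars.isIn k n))
        = pvGlobalHit n := by
    intro n
    unfold pvGlobalHit
    cases decide (n.length > 2) <;> simp
  rw [pvAnySwap]
  simp only [h]

-- Boolean shape of A's if-chain for a non-first word (index ≠ 0 branches gone).
theorem pvChainTail : ∀ (u re ho st po r : Bool),
    (if u then true else if re then true else if ho then true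
     else if st then true else if po then true else r)
      = ((u || (re || (ho || (st || (po || false))))) || r) := by
  decide

-- Boolean shape of A's if-chain for the first word.
theorem pvChainHead : ∀ (a t1 t2 t3 t4 u re sa ho st po r : Bool),
    (if a then true else if t1 then true else if t2 then true else if t3 then true
     else if t4 then true else if u then true else if re then true else if sa then true
     else if ho then true else if st then true else if po then true else r)
      = ((a || (t1 || (t2 || (t3 || (t4 || (sa || (u || (re || (ho || (st || (po || false))))))))))) || r) := by
  decide

theorem pvNorm_eq (w : String) : pvNormA w = pvNormB w := rfl

theorem pvTail (rest : List String) (s : Int) (hs : 1 ≤ s) :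
    pvLoopA (PySem.List.enumerate rest s) = rest.any (fun w => pvGlobalHit (pvNormB w)) := by
  induction rest generalizing s with
  | nil => simp [PySem.List.enumerate_nil, pvLoopA]
  | cons w rest ih =>
    rw [PySem.List.enumerate_cons]
    have hz : (s == 0) = false := by simp; omega
    show pvLoopA ((s, w) :: PySem.List.enumerate rest (s + 1)) = _
    rw [pvLoopA]
    simp only [hz, Bool.and_false]
    rw [ih (s + 1) (by omega)]
    by_cases hlen : (pvNormA w).length > 2
    · simp only [if_pos hlen, pvChainTail]
      rw [pvNorm_eq] at hlen
      have hd : decide ((pvNormB w).length > 2) = true := by simpa using hlen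
      simp only [pvGlobalHit, pvGlobalKeys, List.any_cons, List.any_nil, hd,
        Bool.true_and, pvNorm_eq]
      simp [Bool.or_assoc]
    · simp only [if_neg hlen]
      have : pvGlobalHit (pvNormB w) = false := by
        simp [pvGlobalHit, ← pvNorm_eq]; omega
      simp [this]

theorem pvEq (wordList : List String) :
    disqualifyingWords wordList = disqualifyingWords_alt wordList := by
  cases wordList with
  | nil => rfl
  | cons w rest =>
    rw [disqualifyingWords, PySem.List.enumerate_cons]
    show pvLoopA ((0, w) :: PySem.List.enumerate rest 1) = _
    rw [pvLoopA]
    simp only [disqualifyingWords_alt, List.map_cons]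
    rw [pvGlobalSwap]
    simp only [List.any_cons, List.any_map, Function.comp_def]
    simp only [BEq.rfl, Bool.and_true]
    rw [pvTail rest 1 (by omega)]
    by_cases hlen : (pvNormA w).length > 2
    · generalize (rest.any fun w => pvGlobalHit (pvNormB w)) = br
      simp only [if_pos hlen, pvChainHead]
      rw [pvNorm_eq] at hlen
      have hslice : PySem.List.slice (pvNormB w) none (some 3) = (pvNormB w).take 3 :=
        (by exact_mod_cast PySem.List.slice_to_natCast (pvNormB w) 3)
      have hd : decide ((pvNormB w).length > 2) = true := by simpa using hlen
      simp only [pvGlobalHit, pvFirstKeys, pvGlobalKeys, pvNorm_eq, hslice, hd,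
        List.any_cons, List.any_nil, Bool.true_and]
      generalize PySem.Chars.isIn "arr".toList ((pvNormB w).take 3) = ba
      generalize PySem.Chars.isIn "transcription".toList (pvNormB w) = b1
      generalize PySem.Chars.isIn "transcripción".toList (pvNormB w) = b2
      generalize PySem.Chars.isIn "trans".toList (pvNormB w) = b3
      generalize PySem.Chars.isIn "trad".toList (pvNormB w) = b4
      generalize PySem.Chars.isIn "santa".toList (pvNormB w) = b5
      generalize PySem.Chars.isIn "unbekannt".toList (pvNormB w) = b6
      generalize PySem.Chars.isIn "reelkey".toList (pvNormB w) = b7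
      generalize PySem.Chars.isIn "hornpipekey".toList (pvNormB w) = b8
      generalize PySem.Chars.isIn "strathspeykey".toList (pvNormB w) = b9
      generalize PySem.Chars.isIn "polkakey".toList (pvNormB w) = b10
      revert ba b1 b2 b3 b4 b5 b6 b7 b8 b9 b10 br
      decide
    · simp only [if_neg hlen]
      rw [pvNorm_eq] at hlen
      have h2 : decide ((pvNormB w).length > 2) = false := by simp; omega
      simp [pvGlobalHit, h2]

-- ===== VERDICT (by name: the statement is the Claim_ definition above) =====
theorem disqualifyingWords_spec : Claim_equal_disqualifyingWords := by
  intro wordList _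
  show disqualifyingWords wordList = disqualifyingWords_alt wordList
  exact pvEq wordList
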